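-- pv_equiv track=rewrite | github.com/dacho17/100algorithms | 050CircleOfWords/CircleOfWords.py | circle_of_words
-- ===== SOURCE A (Python) =====
-- def circle_of_words(words):
--     firstLetters, lastLetters = {}, {}
--     for word in words:
--         firstLetter, lastLetter = word[0], word[-1]
--         if firstLetter not in firstLetters:
--             firstLetters[firstLetter] = 0
--         firstLetters[firstLetter] += 1
--         if lastLetter not in lastLetters:
--             lastLetters[lastLetter] = 0
--         lastLetters[lastLetter] += 1
--
--     for letter in firstLetters:
--         if letter not in lastLetters or firstLetters[letter] != lastLetters[letter]:
--             return False
--     return True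
-- ===== SOURCE B (Python) =====
-- def circle_of_words(words):
--     return sorted(word[0] for word in words) == sorted(word[-1] for word in words)
-- ===== Notes on version B (the rewrite author's own statement) =====
-- stated objective: simpler
-- what changed: Replaces the two hash count tables and the key-by-key comparison pass with sort-and-compare: the list of first letters equals the list of last letters as multisets, decided by comparing the two sorted lists; no dictionaries or counters at all.
import Mathlib
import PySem

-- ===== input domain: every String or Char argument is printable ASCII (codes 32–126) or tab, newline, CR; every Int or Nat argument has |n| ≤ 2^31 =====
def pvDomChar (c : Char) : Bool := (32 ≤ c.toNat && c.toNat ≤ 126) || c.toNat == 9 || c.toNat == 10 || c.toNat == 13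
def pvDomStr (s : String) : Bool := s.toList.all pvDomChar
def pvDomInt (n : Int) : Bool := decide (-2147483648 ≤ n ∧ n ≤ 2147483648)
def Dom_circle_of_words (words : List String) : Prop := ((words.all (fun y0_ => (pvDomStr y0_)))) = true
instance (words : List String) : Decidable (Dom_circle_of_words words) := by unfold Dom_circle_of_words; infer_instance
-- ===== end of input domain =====

-- B replaces A's two hash count tables and key-by-key comparison pass with sort-and-compare:
-- the first-letter list and last-letter list are equal as multisets, decided by sorting both.

-- word[0] / word[-1]; the default is never reached under Pre_ (no empty word)
def pvFirstCh (w : String) : Char := (PySem.Str.pyGet? w 0).getD ' '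
def pvLastCh (w : String) : Char := (PySem.Str.pyGet? w (-1)).getD ' '

-- ===== PORT A =====
def circle_of_words (words : List String) : Bool :=
  let st := words.foldl (fun (st : PySem.Dict Char Int × PySem.Dict Char Int) word =>
    let firstLetter := pvFirstCh word
    let lastLetter := pvLastCh word
    let fd := if st.1.contains firstLetter then st.1 else st.1.insert firstLetter 0
    let fd := fd.modify firstLetter 0 (· + 1)
    let ld := if st.2.contains lastLetter then st.2 else st.2.insert lastLetter 0
    let ld := ld.modify lastLetter 0 (· + 1)
    (fd, ld)) (PySem.Dict.empty, PySem.Dict.empty)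
  st.1.keys.all (fun letter =>
    st.2.contains letter && (st.1.getD letter 0 == st.2.getD letter 0))

-- ===== PORT B =====
def circle_of_words_alt (words : List String) : Bool :=
  PySem.List.sorted (words.map pvFirstCh) (fun x => x) false ==
    PySem.List.sorted (words.map pvLastCh) (fun x => x) false

-- ===== PRECONDITION & SPEC =====
-- Pre_ excludes lists containing an empty word, on which A raises IndexError at word[0].
def Pre_circle_of_words (words : List String) : Prop := ∀ w ∈ words, w ≠ ""
instance (words : List String) : Decidable (Pre_circle_of_words words) := by unfold Pre_circle_of_words; infer_instance
def pvWitness_circle_of_words : List String := ["ab", "ba"]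

def Spec_circle_of_words (words : List String) (out : Bool) : Prop := out = circle_of_words_alt words
instance (words : List String) (out : Bool) : Decidable (Spec_circle_of_words words out) := by unfold Spec_circle_of_words; infer_instance

-- ===== CLAIM (what is proved, stated in full; the proofs are below) =====
def Claim_equal_circle_of_words : Prop := ∀ (words : List String), Dom_circle_of_words words → Pre_circle_of_words words → Spec_circle_of_words words (circle_of_words words)

-- ===== LEMMAS AND PROOFS =====

-- A's loop body, named so the characterization lemmas read cleanly
def pvStepA (st : PySem.Dict Char Int × PySem.Dict Char Int) (word : String) :
    PySem.Dict Char Int × PySem.Dict Char Int :=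
  ((if st.1.contains (pvFirstCh word) then st.1 else st.1.insert (pvFirstCh word) 0).modify (pvFirstCh word) 0 (· + 1),
   (if st.2.contains (pvLastCh word) then st.2 else st.2.insert (pvLastCh word) 0).modify (pvLastCh word) 0 (· + 1))

lemma portA_eq (words : List String) :
    circle_of_words words =
      (words.foldl pvStepA (PySem.Dict.empty, PySem.Dict.empty)).1.keys.all (fun letter =>
        (words.foldl pvStepA (PySem.Dict.empty, PySem.Dict.empty)).2.contains letter &&
        ((words.foldl pvStepA (PySem.Dict.empty, PySem.Dict.empty)).1.getD letter 0 ==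
         (words.foldl pvStepA (PySem.Dict.empty, PySem.Dict.empty)).2.getD letter 0)) := rfl

lemma stepA_getD (d : PySem.Dict Char Int) (f c : Char) :
    ((if d.contains f then d else d.insert f 0).modify f 0 (· + 1)).getD c 0
      = d.getD c 0 + (if c = f then 1 else 0) := by
  rw [PySem.Dict.getD_modify]
  by_cases hc : d.contains f
  · simp only [hc, if_true]
    split_ifs with h1 <;> simp [h1]
  · have h0 : d.getD f 0 = 0 := PySem.Dict.getD_of_not_contains d 0 (by simpa using hc)
    simp only [Bool.not_eq_true] at hc
    simp [hc, PySem.Dict.getD_insert]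
    split_ifs with h1 <;> simp [h1, h0]

lemma stepA_mem_keys (d : PySem.Dict Char Int) (f c : Char) :
    c ∈ ((if d.contains f then d else d.insert f 0).modify f 0 (· + 1)).keys
      ↔ c = f ∨ c ∈ d.keys := by
  rw [PySem.Dict.keys_modify, PySem.Dict.mem_keys_insert]
  by_cases hc : d.contains f
  · simp [hc]
  · simp only [Bool.not_eq_true] at hc
    simp [hc, PySem.Dict.mem_keys_insert]

lemma foldA_getD (ws : List String) (d1 d2 : PySem.Dict Char Int) (c : Char) :
    (ws.foldl pvStepA (d1, d2)).1.getD c 0 = d1.getD c 0 + ((ws.map pvFirstCh).count c : Int)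
    ∧ (ws.foldl pvStepA (d1, d2)).2.getD c 0 = d2.getD c 0 + ((ws.map pvLastCh).count c : Int) := by
  induction ws generalizing d1 d2 with
  | nil => simp
  | cons w ws ih =>
    simp only [List.foldl_cons, List.map_cons, List.count_cons]
    have hstep : pvStepA (d1, d2) w =
        ((if d1.contains (pvFirstCh w) then d1 else d1.insert (pvFirstCh w) 0).modify (pvFirstCh w) 0 (· + 1),
         (if d2.contains (pvLastCh w) then d2 else d2.insert (pvLastCh w) 0).modify (pvLastCh w) 0 (· + 1)) := rfl
    rw [hstep]
    refine ⟨?_, ?_⟩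
    · rw [(ih _ _).1, stepA_getD]
      by_cases h : c = pvFirstCh w
      · subst h; simp; ring
      · simp [beq_iff_eq, Ne.symm h, h]
    · rw [(ih _ _).2, stepA_getD]
      by_cases h : c = pvLastCh w
      · subst h; simp; ring
      · simp [beq_iff_eq, Ne.symm h, h]

lemma foldA_mem_keys (ws : List String) (d1 d2 : PySem.Dict Char Int) (c : Char) :
    (c ∈ (ws.foldl pvStepA (d1, d2)).1.keys ↔ c ∈ d1.keys ∨ c ∈ ws.map pvFirstCh)
    ∧ (c ∈ (ws.foldl pvStepA (d1, d2)).2.keys ↔ c ∈ d2.keys ∨ c ∈ ws.map pvLastCh) := by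
  induction ws generalizing d1 d2 with
  | nil => simp
  | cons w ws ih =>
    simp only [List.foldl_cons, List.map_cons, List.mem_cons]
    have hstep : pvStepA (d1, d2) w =
        ((if d1.contains (pvFirstCh w) then d1 else d1.insert (pvFirstCh w) 0).modify (pvFirstCh w) 0 (· + 1),
         (if d2.contains (pvLastCh w) then d2 else d2.insert (pvLastCh w) 0).modify (pvLastCh w) 0 (· + 1)) := rfl
    rw [hstep]
    constructor
    · rw [(ih _ _).1, stepA_mem_keys]; tauto
    · rw [(ih _ _).2, stepA_mem_keys]; tauto

-- equal totals: if every letter occurring as a first letter balances, every letter balances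
lemma counts_eq_of_firsts (F L : List Char) (hlen : F.length = L.length)
    (h : ∀ c ∈ F, F.count c = L.count c) : ∀ c, F.count c = L.count c := by
  have hle : (F : Multiset Char) ≤ (L : Multiset Char) := by
    rw [Multiset.le_iff_count]
    intro a
    simp only [Multiset.coe_count]
    by_cases ha : a ∈ F
    · exact (h a ha).le
    · simp [List.count_eq_zero_of_not_mem ha]
  have heq : (F : Multiset Char) = (L : Multiset Char) :=
    Multiset.eq_of_le_of_card_le hle (by simp [hlen])
  intro c
  have hc := congrArg (Multiset.count c) heq
  simpa [Multiset.coe_count] using hc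

lemma ports_agree (words : List String) :
    circle_of_words words = circle_of_words_alt words := by
  rw [Bool.eq_iff_iff, portA_eq]
  unfold circle_of_words_alt
  rw [beq_iff_eq, PySem.List.sorted_id_eq_sorted_id_iff_perm, List.perm_iff_count]
  simp only [List.all_eq_true, Bool.and_eq_true, beq_iff_eq]
  constructor
  · -- A's check passes → counts equal everywhere
    intro hA
    apply counts_eq_of_firsts _ _ (by simp)
    intro x hx
    have hx' := hA x (((foldA_mem_keys words _ _ x).1).mpr
      (by simp [PySem.Dict.keys_empty, hx]))
    have h1 := (foldA_getD words PySem.Dict.empty PySem.Dict.empty x).1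
    have h2 := (foldA_getD words PySem.Dict.empty PySem.Dict.empty x).2
    rw [h1, h2] at hx'
    simp only [PySem.Dict.getD_empty, zero_add] at hx'
    exact_mod_cast hx'.2
  · -- counts equal everywhere → A's check passes
    intro hcnt c hc
    have hcF : c ∈ words.map pvFirstCh := by
      have := ((foldA_mem_keys words PySem.Dict.empty PySem.Dict.empty c).1).mp hc
      simpa [PySem.Dict.keys_empty] using this
    have hApos : 0 < (words.map pvFirstCh).count c := List.count_pos_iff.mpr hcF
    have hcL : c ∈ words.map pvLastCh := List.count_pos_iff.mp (by rw [← hcnt]; exact hApos)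
    refine ⟨?_, ?_⟩
    · rw [PySem.Dict.contains_iff_mem_keys, (foldA_mem_keys words _ _ c).2]
      simp [PySem.Dict.keys_empty, hcL]
    · rw [(foldA_getD words PySem.Dict.empty PySem.Dict.empty c).1,
        (foldA_getD words PySem.Dict.empty PySem.Dict.empty c).2]
      simp only [PySem.Dict.getD_empty, zero_add]
      exact_mod_cast hcnt c

-- ===== VERDICT (by name: the statement is the Claim_ definition above) =====
theorem circle_of_words_spec : Claim_equal_circle_of_words := by
  intro words _ _
  unfold Spec_circle_of_words
  exact ports_agree words
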